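-- pv_equiv track=rewrite | github.com/MischaGithub/sd_be_assessment | league_ranking.py | calculate_ranking
-- ===== SOURCE A (Python) =====
-- def calculate_ranking(scores):
--     sorted_teams = sorted(scores.items(), key=lambda x: (-x[1], x[0]))
--     output = []
--
--     rank = 0
--     prev_score = None
--     for i, (team, score) in enumerate(sorted_teams, start=1):
--         rank = i if score != prev_score else rank
--         output.append(f"{rank}. {team}, {score} pt{'s' if score != 1 else ''}")
--         prev_score = score
--
--     return "\n".join(output)
-- ===== SOURCE B (Python) =====
-- def calculate_ranking(scores):
--     values = list(scores.values())
--
--     def rank(score):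
--         # competition rank, stateless: 1 + number of teams with a strictly higher score
--         return 1 + sum(1 for v in values if v > score)
--
--     return "\n".join(
--         f"{rank(s)}. {t}, {s} pt{'s' if s != 1 else ''}"
--         for t, s in sorted(scores.items(), key=lambda x: (-x[1], x[0]))
--     )
-- ===== Notes on version B (the rewrite author's own statement) =====
-- stated objective: simpler
-- what changed: B replaces A's stateful rank/prev-score loop over the enumerated sorted list by a stateless closed-form competition rank (1 + number of teams with a strictly higher score) computed independently for each sorted team.
import Mathlib
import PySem

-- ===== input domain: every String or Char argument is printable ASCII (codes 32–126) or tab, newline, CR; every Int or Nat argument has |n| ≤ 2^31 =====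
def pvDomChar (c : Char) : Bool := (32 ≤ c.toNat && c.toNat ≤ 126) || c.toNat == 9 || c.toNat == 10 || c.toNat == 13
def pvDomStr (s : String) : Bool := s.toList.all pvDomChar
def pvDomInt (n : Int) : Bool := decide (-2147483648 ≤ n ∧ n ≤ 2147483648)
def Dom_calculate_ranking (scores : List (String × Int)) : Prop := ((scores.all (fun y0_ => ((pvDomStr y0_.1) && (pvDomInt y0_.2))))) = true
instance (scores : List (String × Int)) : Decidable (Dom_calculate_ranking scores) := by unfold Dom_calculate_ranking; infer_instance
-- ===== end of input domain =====

-- B replaces A's running rank/prev-score state by a stateless closed-form competition rank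
-- (1 + number of strictly higher scores); objective: simpler.

-- shared by both ports: the f-string "{rank}. {team}, {score} pt{'s' if score != 1 else ''}"
def pvLine (rank : Int) (team : String) (score : Int) : String :=
  PySem.Int.toStr rank ++ ". " ++ team ++ ", " ++ PySem.Int.toStr score ++ " pt" ++
    (if score ≠ 1 then "s" else "")

-- ===== PORT A =====
-- the for-loop over enumerate(sorted_teams, start=1) carrying (i, rank, prev_score, output)
def pvLoopA : List (String × Int) → Int → Int → Option Int → List String → List String
  | [], _, _, _, out => out
  | (team, score) :: rest, i, rank, prev, out =>
      let rank' := if prev ≠ some score then i else rank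
      pvLoopA rest (i + 1) rank' (some score) (out ++ [pvLine rank' team score])

def calculate_ranking (scores : List (String × Int)) : String :=
  let sorted_teams := PySem.List.sorted2 scores (fun x => -x.2) (fun x => x.1)
  PySem.Str.join "\n" (pvLoopA sorted_teams 1 0 none [])

-- ===== PORT B =====
def calculate_ranking_alt (scores : List (String × Int)) : String :=
  let values := scores.map (fun p => p.2)
  let rank := fun (score : Int) => 1 + (Int.ofNat (values.countP (fun v => decide (score < v))))
  PySem.Str.join "\n"
    ((PySem.List.sorted2 scores (fun x => -x.2) (fun x => x.1)).map
      (fun p => pvLine (rank p.2) p.1 p.2))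

-- ===== PRECONDITION & SPEC =====
def Spec_calculate_ranking (scores : List (String × Int)) (out : String) : Prop := out = calculate_ranking_alt scores
instance (scores : List (String × Int)) (out : String) : Decidable (Spec_calculate_ranking scores out) := by unfold Spec_calculate_ranking; infer_instance

-- ===== CLAIM (what is proved, stated in full; the proofs are below) =====
def Claim_equal_calculate_ranking : Prop := ∀ (scores : List (String × Int)), Dom_calculate_ranking scores → Spec_calculate_ranking scores (calculate_ranking scores)

-- ===== LEMMAS AND PROOFS =====

-- number of entries of l whose score is strictly greater than s
def pvGT (s : Int) (l : List (String × Int)) : Nat := l.countP (fun q => decide (s < q.2))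

theorem pvLoopA_out (l : List (String × Int)) (i rank : Int) (prev : Option Int)
    (out : List String) : pvLoopA l i rank prev out = out ++ pvLoopA l i rank prev [] := by
  induction l generalizing i rank prev out with
  | nil => simp [pvLoopA]
  | cons p rest ih =>
      obtain ⟨t, s⟩ := p
      simp only [pvLoopA]
      rw [ih, ih (out := [] ++ _)]
      simp

theorem sorted2_eq_sorted_lex (xs : List (String × Int)) :
    PySem.List.sorted2 xs (fun x => -x.2) (fun x => x.1) =
    PySem.List.sorted xs (fun x => toLex (-x.2, x.1)) := by
  simp only [PySem.List.sorted2, PySem.List.sorted, if_neg (by decide : ¬ (false = true))]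
  have : (fun (a b : String × Int) => decide (-a.2 < -b.2) || !decide (-b.2 < -a.2) && decide (a.1 < b.1))
       = (fun a b => decide (toLex (-a.2, a.1) < toLex (-b.2, b.1))) := by
    funext a b
    rcases lt_trichotomy (-a.2) (-b.2) with h | h | h
    · simp [Prod.Lex.toLex_lt_toLex, h]
    · simp [Prod.Lex.toLex_lt_toLex, h]
    · have h1 : ¬ (-a.2 < -b.2) := by omega
      have h2 : -a.2 ≠ -b.2 := by omega
      simp [Prod.Lex.toLex_lt_toLex, h, h1, h2]
  rw [this]

theorem pairwise_desc (xs : List (String × Int)) :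
    (PySem.List.sorted2 xs (fun x => -x.2) (fun x => x.1)).Pairwise
      (fun a b => b.2 ≤ a.2) := by
  rw [sorted2_eq_sorted_lex]
  refine (PySem.List.sorted_pairwise xs (fun x => toLex (-x.2, x.1))).imp ?_
  intro a b h
  rcases (Prod.Lex.toLex_le_toLex).mp h with h1 | ⟨h1, _⟩ <;> omega

theorem pvLoopA_eq_map (l' : List (String × Int)) :
    ∀ (pre : List (String × Int)) (i rank : Int) (prev : Option Int),
    (pre ++ l').Pairwise (fun a b => b.2 ≤ a.2) →
    i = pre.length + 1 →
    (match prev with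
      | none => pre = []
      | some s => (∀ q ∈ pre, s ≤ q.2) ∧ (∀ q ∈ l', q.2 ≤ s) ∧
          rank = 1 + (Int.ofNat (pvGT s (pre ++ l')))) →
    pvLoopA l' i rank prev [] =
      l'.map (fun q => pvLine (1 + Int.ofNat (pvGT q.2 (pre ++ l'))) q.1 q.2) := by
  induction l' with
  | nil => intro pre i rank prev _ _ _; simp [pvLoopA]
  | cons p rest ih =>
    intro pre i rank prev hpw hi hprev
    obtain ⟨t, s'⟩ := p
    have hsplit := List.pairwise_append.mp hpw
    have hcons := List.pairwise_cons.mp hsplit.2.1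
    have hrest_le : ∀ q ∈ rest, q.2 ≤ s' := hcons.1
    -- count of strictly-higher scores in the whole list = count within the prefix
    have hGT : pvGT s' (pre ++ (t, s') :: rest) = pre.countP (fun q => decide (s' < q.2)) := by
      have hz : rest.countP (fun q => decide (s' < q.2)) = 0 :=
        List.countP_eq_zero.mpr (by intro q hq; simpa using not_lt_of_ge (hrest_le q hq))
      simp [pvGT, List.countP_append, hz]
    have hrank' : (if prev ≠ some s' then i else rank)
        = 1 + Int.ofNat (pvGT s' (pre ++ (t, s') :: rest)) := by
      by_cases hne : prev ≠ some s'
      · rw [if_pos hne]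
        have hall : ∀ q ∈ pre, s' < q.2 := by
          intro q hq
          match prev, hprev with
          | none, hp => rw [hp] at hq; cases hq
          | some s, hp =>
            have hs' : s' ≤ s := hp.2.1 (t, s') (by simp)
            have : s ≠ s' := by intro hss; exact hne (by rw [hss])
            have : s' < s := lt_of_le_of_ne hs' (Ne.symm this)
            exact lt_of_lt_of_le this (hp.1 q hq)
        have hlen : pre.countP (fun q => decide (s' < q.2)) = pre.length :=
          List.countP_eq_length.mpr (by intro q hq; simpa using hall q hq)
        rw [hGT, hlen, hi]
        simp only [Int.ofNat_eq_natCast]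
        omega
      · rw [if_neg hne]
        rw [not_ne_iff] at hne
        subst hne
        exact hprev.2.2
    simp only [pvLoopA]
    rw [pvLoopA_out, hrank']
    have hIH := ih (pre ++ [(t, s')]) (i + 1)
        (1 + Int.ofNat (pvGT s' (pre ++ (t, s') :: rest))) (some s')
        (by simpa using hpw)
        (by simp [hi])
        (by
          refine ⟨?_, hrest_le, by simp⟩
          intro q hq
          rcases List.mem_append.mp hq with hq | hq
          · match prev, hprev with
            | none, hp => rw [hp] at hq; cases hq
            | some s, hp =>
              have hs' : s' ≤ s := hp.2.1 (t, s') (by simp)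
              exact le_trans hs' (hp.1 q hq)
          · simp at hq; simp [hq])
    simp only [List.append_assoc, List.cons_append, List.nil_append] at hIH ⊢
    rw [hIH]
    simp

theorem calculate_ranking_spec : Claim_equal_calculate_ranking := by
  intro scores _
  show PySem.Str.join "\n"
      (pvLoopA (PySem.List.sorted2 scores (fun x => -x.2) (fun x => x.1)) 1 0 none [])
    = PySem.Str.join "\n"
      ((PySem.List.sorted2 scores (fun x => -x.2) (fun x => x.1)).map
        (fun p => pvLine (1 + Int.ofNat ((scores.map (fun p => p.2)).countP
            (fun v => decide (p.2 < v)))) p.1 p.2))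
  have hmain := pvLoopA_eq_map
      (PySem.List.sorted2 scores (fun x => -x.2) (fun x => x.1)) [] 1 0 none
      (by simpa using pairwise_desc scores) (by simp) rfl
  simp only [List.nil_append] at hmain
  rw [hmain]
  refine congrArg _ (List.map_congr_left ?_)
  intro q _
  have hperm : (PySem.List.sorted2 scores (fun x => -x.2) (fun x => x.1)).Perm scores :=
    PySem.List.sorted2_perm ..
  have hcnt : pvGT q.2 (PySem.List.sorted2 scores (fun x => -x.2) (fun x => x.1))
      = (scores.map (fun p => p.2)).countP (fun v => decide (q.2 < v)) := by
    rw [pvGT, hperm.countP_eq, List.countP_map]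
    rfl
  rw [hcnt]
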